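/-
  THE SEGMENTS OF `prog_main` (gif_driver.c:245-259; 37 instructions at 105000H; a PROTECTED frame: the 64-byte `report` at
  base + 32; base = RA − 168; contract: Gif/Spec/Driver.lean `prog_main.spec`; design/units/prog_main.tsv).

      unit  from      to                       what it walks
      P     105000H   105042H                  four pushes, `sub rsp, 136`, the frame's header, the shadow index in `rbx`, the two poison
                                               stores                                                                   (12 instructions)
      1     105042H   105082H                  `len < 0` (l.250: `test rsi, rsi ; js`): `eax = 0`; otherwise `rbp = out`, `r12 = cap`,
                                               `gif_decode(in, len, &report)` (l.253); `cap < 64` (l.254: `cmp r12, 63 ; jg`): `eax = 0`;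
                                               otherwise `memcpy(out, &report, 64)` (l.257), `eax = 64`                  (17)
      E     105082H   ret                      the two stores that clear the frame's shadow, `add rsp, 136`, four pops, `ret`      (8)
      COMPOSITION                              `compose`, proved below

  The contract's post is `True`: the epilogue's entry assertion asks nothing of the heap.
-/
import Gif.Spec.Driver
import Gif.LabelsAt
namespace Gif.Spec
open X86 X86.User Asan ProgX.Base ProgX.Base.Spec

namespace prog_main

/-- The active frames inside the body: the function's own protected frame (`base = RA − 168`), innermost. -/
abbrev framesIn (frames : List (Nat × FrameLayout)) (e : State) : List (Nat × FrameLayout) :=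
  ((e.reg .rsp).toNat - 168, Gif.Frames.prog_main) :: frames

/-- **The own `report` is live, under every heap**: `⟨RA − 136, 64, .stack⟩` is the object of the own protected frame
(`Gif.Frames.prog_main`, `FrameLayout.objsAt`, `stackObjs_cons`). It is gif_decode's third argument (its pre: `LiveIn … 64` and
the bounds of the stack region) and `memcpy`'s source. (`hroom`: from `AtEntry.room`, the stack region starts at 700000H.) -/
theorem reportLive (rest : List Obj) (frames : List (Nat × FrameLayout)) (e : State) (hroom : 168 ≤ (e.reg .rsp).toNat)
    (H' : Heap) (a n : Nat) (h1 : (e.reg .rsp).toNat - 136 ≤ a) (h2 : a + n ≤ (e.reg .rsp).toNat - 72) :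
    LiveIn (H'.liveObjs ++ rest) (framesIn frames e) a n := by
  refine ⟨⟨(e.reg .rsp).toNat - 136, 64, .stack⟩, List.mem_append_left _ ?_, ?_, ?_⟩
  · rw [stackObjs_cons]
    apply List.mem_append_left
    unfold FrameLayout.objsAt
    apply List.mem_map.mpr
    refine ⟨⟨"report", 32, 64⟩, ?_, ?_⟩
    · unfold Gif.Frames.prog_main
      exact List.mem_cons_self
    · simp only [Obj.mk.injEq, and_true]
      omega
  · exact h1
  · show a + n ≤ (e.reg .rsp).toNat - 136 + 64
    omega

/-- **WHAT EVERY CUT OF THE BODY SHARES**: the state `v` stands at the address `cut`, inside the call that was entered at the state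
`e` (return address `ret`) with the function's precondition. The prologue is done: four registers saved (`r13 r12 rbp rbx` in push
order; `r13` is saved and never written), `rsp = RA − 168`, `rbx` = the shadow index of the frame (`(RA − 168) >> 3`: the epilogue's
stores address `[rbx + C00000H]`), `r14 r15` never touched; nothing was written but the function's stack, the frame's 16 shadow bytes
and the contract's windows (the heap's region and its shadow, the output). The frame's object `report` is at `rsp + 0x20` = RA − 136. -/
structure Core (cut : Word) (H : Heap) (rest : List Obj) (frames : List (Nat × FrameLayout)) (u₀ e : State)
    (ret : Word) (v : State) : Prop where
  /-- the function was entered at `e` … -/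
  entry : AtEntry (conv u₀) Gif.L.prog_main.entry (prog_main.spec H rest frames).frame ret e
  /-- … with its precondition -/
  pre : (prog_main.spec H rest frames).pre e
  rip : v.rip = cut
  /-- four pushes and `sub rsp, 136` below the return address -/
  rsp : v.reg .rsp = e.reg .rsp - 168
  /-- `mov rbx, rsp ; shr rbx, 3` (10500DH, 10502AH): the shadow index of the frame -/
  rbx : v.reg .rbx = (e.reg .rsp - 168) >>> 3
  /-- not used by the function -/
  r14 : v.reg .r14 = e.reg .r14
  r15 : v.reg .r15 = e.reg .r15
  /-- the saved registers, in push order: the four pops at 10509DH … 1050A1H (segment E) read them -/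
  slot_r13 : v.mem.readLE (e.reg .rsp - 8) 8 = (e.reg .r13).toNat
  slot_r12 : v.mem.readLE (e.reg .rsp - 16) 8 = (e.reg .r12).toNat
  slot_rbp : v.mem.readLE (e.reg .rsp - 24) 8 = (e.reg .rbp).toNat
  slot_rbx : v.mem.readLE (e.reg .rsp - 32) 8 = (e.reg .rbx).toNat
  /-- the return address is still in its slot: the `ret` at 1050A3H (segment E) pops it. No store of the body meets it: gif_decode
  writes its stack and the own `report` (both below it) and the heap's region (800000H and above); `memcpy` writes the output, an
  object of `rest`, off the stack region (`ShadowInv.off`) -/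
  slot_ra : UInt64.ofNat (v.mem.readLE (e.reg .rsp) 8) = ret
  /-- the footprint so far: the function's stack (`frame = 1168`), the shadow of the own frame (`[RA − 168, RA − 40)`), the contract's
  two windows -/
  same : Mem.SameExcept
    [⟨(e.reg .rsp).toNat - 1168, (e.reg .rsp).toNat⟩,
     shadowSpan ((e.reg .rsp).toNat - 168) ((e.reg .rsp).toNat - 40),
     ⟨0x800000, 0x1000020⟩,
     ⟨(e.reg .rdx).toNat, (e.reg .rdx).toNat + 64⟩] e.mem v.mem
  code : (conv u₀).code.In v.mem
  abi : (conv u₀).inv v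

/-- **AFTER THE PROLOGUE** (105042H `test rsi, rsi`): `Core`; the four arguments the body reads are still in their registers
(`rdi = in`, `rsi = len`, `rdx = out`, `rcx = cap`); the heap is the entry's, with the OWN frame pushed (`HeapInv.prologue_ra` with
`Gif.Frames.prog_main_ok`); the image's constants are in memory (gif_decode's pre). -/
structure Body (H : Heap) (rest : List Obj) (frames : List (Nat × FrameLayout)) (u₀ e : State)
    (ret : Word) (v : State) : Prop where
  core : Core Gif.L.prog_main.at_105042 H rest frames u₀ e ret v
  /-- the argument registers, untouched by the prologue -/
  rdi : v.reg .rdi = e.reg .rdi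
  rsi : v.reg .rsi = e.reg .rsi
  rdx : v.reg .rdx = e.reg .rdx
  rcx : v.reg .rcx = e.reg .rcx
  /-- the heap's invariant for the entry's heap, the own frame active, the clean stack ending at the present stack pointer -/
  inv : HeapInv H rest (framesIn frames e) ((e.reg .rsp).toNat - 168) v.mem
  /-- the constants (the prologue wrote stack and shadow only) -/
  consts : Consts v.mem

/-- **BEFORE THE EPILOGUE** (105082H, the joint of the three returns): `Core`. The result is in `eax`: any value — the contract's post
is `True`. -/
structure Done (H : Heap) (rest : List Obj) (frames : List (Nat × FrameLayout)) (u₀ e : State)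
    (ret : Word) (v : State) : Prop where
  core : Core Gif.L.prog_main.at_105082 H rest frames u₀ e ret v

/-- **Segment P** (the prologue, 105000H … 105042H, 12 instructions): four pushes, `sub rsp, 136`, the frame's three header words, the
shadow index in `rbx`, the two poison stores. -/
def SegP (Lay : Layout) (μ : Microarch) (u₀ : State) : Prop :=
  ∀ (H : Heap) (rest : List Obj) (frames : List (Nat × FrameLayout)) (e : State) (ret : Word),
    AtEntry (conv u₀) Gif.L.prog_main.entry (prog_main.spec H rest frames).frame ret e →
    (prog_main.spec H rest frames).pre e →
    ReachVia Lay μ WayInv e (Body H rest frames u₀ e ret)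

/-- **Segment 1** (105042H … 105082H, l.250-258, 17 instructions): `test rsi, rsi ; js`: `len < 0` as a signed number (`2^63 ≤ rsi`):
`eax = 0` (10507DH), to the epilogue. Otherwise `rsi < 2^63`: `rbp = out`, `r12 = cap`, `rdx = rsp + 0x20 = &report`;
`gif_decode`'s contract for `H`, `rest`, `framesIn frames e`: `HeapPre` from `inv` (and the pre's base, limit, text clauses),
`GlobalsIn`, `Consts`, the input clause (the pre's, with `rsi < 2^63`), the report `LiveIn … 64` (`reportLive`) in the stack region.
Its post: A heap `H'` at the place of `H` with its invariant. `cmp r12, 63 ; jg` (signed): `cap ≤ 63` or negative: `eax = 0`, to the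
epilogue. Otherwise `64 ≤ rcx < 2^63`: the pre gives `LiveIn rest [] out 64`: `memcpy(out, &report, 64)` — `ShadowPre` from the
heap's invariant for `H'` (`HeapInv.shadow`), the destination live under every heap and every list of frames (`LiveIn.mono`), the
source `reportLive` for `H'`, no harmful overlap (the output is an object of `rest`, off the stack region: `ShadowInv.off`; the source
lies in it) —, its footprint `[out, out + 64)` is the contract's second window; `eax = 64`, to the epilogue. -/
def Seg1 (Lay : Layout) (μ : Microarch) (u₀ : State) : Prop :=
  ∀ (H : Heap) (rest : List Obj) (frames : List (Nat × FrameLayout)) (e : State) (ret : Word) (v : State),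
    Body H rest frames u₀ e ret v →
    ReachVia Lay μ WayInv v (Done H rest frames u₀ e ret)

/-- **Segment E** (the epilogue, 105082H … 1050A4H, 8 instructions): the two 4-byte stores that clear the frame's shadow
(`[rbx + C00000H]`, `[rbx + C0000CH]`: inside `shadowSpan (RA − 168) (RA − 40)`), `add rsp, 136`, four pops, `ret`: the contract's
`Returned` (the post is `True`; `same`: `core.same`, the own frame's shadow lies inside `[800000H, 1000020H)`). -/
def SegE (Lay : Layout) (μ : Microarch) (u₀ : State) : Prop :=
  ∀ (H : Heap) (rest : List Obj) (frames : List (Nat × FrameLayout)) (e : State) (ret : Word) (v : State),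
    Done H rest frames u₀ e ret v →
    ReachVia Lay μ WayInv v (Returned (conv u₀) (prog_main.spec H rest frames) e ret)

/-- **The composition of `prog_main`**: the three segments chain into the function's contract. -/
theorem compose {Lay : Layout} {μ : Microarch} {u₀ : State} (hP : SegP Lay μ u₀) (h1 : Seg1 Lay μ u₀) (hE : SegE Lay μ u₀) :
    ∀ (H : Heap) (rest : List Obj) (frames : List (Nat × FrameLayout)),
      Calls Lay μ WayInv (conv u₀) Gif.L.prog_main.entry (prog_main.spec H rest frames) := by
  intro H rest frames e ret he hp
  refine (hP H rest frames e ret he hp).trans ?_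
  intro v hv
  refine (h1 H rest frames e ret v hv).trans ?_
  intro w hw
  exact hE H rest frames e ret w hw

end prog_main

end Gif.Spec
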